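-- pv_equiv track=rewrite | github.com/AndanteKim/LeetCode_Practice | 0296-best-meeting-point/0296-best-meeting-point.py | _min_distance_1d
-- ===== SOURCE A (Python) =====
-- from typing import List
--
-- def _min_distance_1d(points: List[int], origin: int) -> int:
--     dist = 0
--     i, j = 0, len(points) - 1
--     while i < j:
--         dist += points[j] - points[i]
--         i += 1
--         j -= 1
--
--     return dist
-- ===== SOURCE B (Python) =====
-- from typing import List
--
-- def _min_distance_1d(points: List[int], origin: int) -> int:
--     n = len(points)
--     return sum(p * ((2 * i > n - 1) - (2 * i < n - 1)) for i, p in enumerate(points))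
-- ===== Notes on version B (the rewrite author's own statement) =====
-- stated objective: alternative
-- what changed: Replaces the inward two-pointer pairing loop by a single enumerate pass that multiplies each point by its signed coefficient sign(2*i - (n-1)) (+1 upper half, -1 lower half, 0 middle) and sums the products.
import Mathlib
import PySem

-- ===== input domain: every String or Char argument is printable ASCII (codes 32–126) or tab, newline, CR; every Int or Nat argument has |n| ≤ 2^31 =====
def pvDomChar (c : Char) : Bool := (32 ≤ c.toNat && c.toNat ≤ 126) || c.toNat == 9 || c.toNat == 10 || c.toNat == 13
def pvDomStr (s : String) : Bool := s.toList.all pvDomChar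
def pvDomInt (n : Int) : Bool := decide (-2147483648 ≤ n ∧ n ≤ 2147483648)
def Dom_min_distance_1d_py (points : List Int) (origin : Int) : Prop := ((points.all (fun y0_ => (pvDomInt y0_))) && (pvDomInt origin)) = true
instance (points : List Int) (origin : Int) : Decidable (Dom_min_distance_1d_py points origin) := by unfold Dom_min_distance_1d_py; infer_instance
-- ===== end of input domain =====

-- B replaces A's inward two-pointer pairing loop by a single enumerate pass summing each
-- point times its signed coefficient sign(2*i - (n-1)); objective: alternative (same O(n)).

-- ===== PORT A =====
-- while i < j: dist += points[j] - points[i]; i += 1; j -= 1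
-- (indices are always in range when the loop body runs, so the pyGet? is always `some`; .getD 0 is never the default)
def pvLoopA (points : List Int) (dist i j : Int) : Int :=
  if i < j then
    pvLoopA points
      (dist + ((PySem.List.pyGet? points j).getD 0 - (PySem.List.pyGet? points i).getD 0))
      (i + 1) (j - 1)
  else dist
termination_by (j - i).toNat
decreasing_by omega

def min_distance_1d_py (points : List Int) (origin : Int) : Int :=
  pvLoopA points 0 0 ((points.length : Int) - 1)

-- ===== PORT B =====
-- sum(p * ((2 * i > n - 1) - (2 * i < n - 1)) for i, p in enumerate(points))
def min_distance_1d_py_alt (points : List Int) (origin : Int) : Int :=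
  let n : Int := points.length
  ((PySem.List.enumerate points).map (fun ip =>
      ip.2 * ((if 2 * ip.1 > n - 1 then (1 : Int) else 0)
              - (if 2 * ip.1 < n - 1 then (1 : Int) else 0)))).sum

-- ===== PRECONDITION & SPEC =====
def Spec_min_distance_1d_py (points : List Int) (origin : Int) (out : Int) : Prop := out = min_distance_1d_py_alt points origin
instance (points : List Int) (origin : Int) (out : Int) : Decidable (Spec_min_distance_1d_py points origin out) := by unfold Spec_min_distance_1d_py; infer_instance

-- ===== CLAIM (what is proved, stated in full; the proofs are below) =====
def Claim_equal_min_distance_1d_py : Prop := ∀ (points : List Int) (origin : Int), Dom_min_distance_1d_py points origin → Spec_min_distance_1d_py points origin (min_distance_1d_py points origin)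

-- ===== LEMMAS AND PROOFS =====

-- B's weighted sum over an already-enumerated list, threshold t (= n - 1 at the top call)
def pvW (t : Int) (l : List (Int × Int)) : Int :=
  (l.map (fun ip =>
      ip.2 * ((if 2 * ip.1 > t then (1 : Int) else 0)
              - (if 2 * ip.1 < t then (1 : Int) else 0)))).sum

lemma altB (xs : List Int) (origin : Int) :
    min_distance_1d_py_alt xs origin = pvW ((xs.length : Int) - 1) (PySem.List.enumerate xs 0) := by
  rfl

-- shifting all indices up by one is the same as lowering the threshold by two
lemma pvW_shift (t : Int) : ∀ (ys : List Int) (s : Int),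
    pvW t (PySem.List.enumerate ys (s + 1)) = pvW (t - 2) (PySem.List.enumerate ys s) := by
  intro ys
  induction ys with
  | nil => intro s; simp [PySem.List.enumerate_nil, pvW]
  | cons y ys ih =>
    intro s
    rw [PySem.List.enumerate_cons, PySem.List.enumerate_cons]
    simp only [pvW, List.map_cons, List.sum_cons] at *
    rw [show s + 1 + 1 = (s + 1) + 1 from rfl, ih (s + 1)]
    have e1 : (if 2 * (s + 1) > t then (1:Int) else 0) = (if 2 * s > t - 2 then (1:Int) else 0) := by
      by_cases h : 2 * s > t - 2
      · rw [if_pos h, if_pos (by omega)]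
      · rw [if_neg h, if_neg (by omega)]
    have e2 : (if 2 * (s + 1) < t then (1:Int) else 0) = (if 2 * s < t - 2 then (1:Int) else 0) := by
      by_cases h : 2 * s < t - 2
      · rw [if_pos h, if_pos (by omega)]
      · rw [if_neg h, if_neg (by omega)]
    rw [e1, e2]

lemma pvW_nil (t : Int) : pvW t [] = 0 := rfl

lemma pvW_cons (t i x : Int) (l : List (Int × Int)) :
    pvW t ((i, x) :: l)
      = x * ((if 2 * i > t then (1 : Int) else 0) - (if 2 * i < t then (1 : Int) else 0))
        + pvW t l := by
  simp [pvW]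

lemma pvW_append (t : Int) (l1 l2 : List (Int × Int)) :
    pvW t (l1 ++ l2) = pvW t l1 + pvW t l2 := by
  simp [pvW]

-- peel both ends: W over a :: ys ++ [b] with threshold len-1 = |ys|+1
lemma pvW_peel (a b : Int) (ys : List Int) :
    pvW ((ys.length : Int) + 1) (PySem.List.enumerate (a :: ys ++ [b]) 0)
      = (b - a) + pvW ((ys.length : Int) - 1) (PySem.List.enumerate ys 0) := by
  rw [List.cons_append, PySem.List.enumerate_cons, PySem.List.enumerate_append,
      PySem.List.enumerate_cons, PySem.List.enumerate_nil]
  rw [pvW_cons, pvW_append, pvW_cons, pvW_nil]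
  rw [pvW_shift ((ys.length : Int) + 1) ys 0]
  have ht : (ys.length : Int) + 1 - 2 = (ys.length : Int) - 1 := by ring
  rw [ht]
  have c0a : ¬ (2 * (0:Int) > (ys.length : Int) + 1) := by omega
  have c0b : (2 * (0:Int) < (ys.length : Int) + 1) := by omega
  have cla : (2 * ((0:Int) + 1 + (ys.length : Int)) > (ys.length : Int) + 1) := by omega
  have clb : ¬ (2 * ((0:Int) + 1 + (ys.length : Int)) < (ys.length : Int) + 1) := by omega
  rw [if_neg c0a, if_pos c0b, if_pos cla, if_neg clb]
  ring

-- accumulator lemma for A's loop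
lemma loop_acc (xs : List Int) : ∀ (n : Nat) (dist i j : Int), (j - i).toNat = n →
    pvLoopA xs dist i j = dist + pvLoopA xs 0 i j := by
  intro n
  induction n using Nat.strong_induction_on with
  | _ n ih =>
    intro dist i j hn
    conv_lhs => rw [pvLoopA]
    conv_rhs => rw [pvLoopA]
    by_cases h : i < j
    · simp only [if_pos h]
      rw [ih ((j - 1) - (i + 1)).toNat (by omega) _ (i + 1) (j - 1) rfl,
          ih ((j - 1) - (i + 1)).toNat (by omega) (0 + _) (i + 1) (j - 1) rfl]
      ring
    · simp [if_neg h]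

-- index shift: dropping the outer pair shifts indices down by one
lemma get_shift (a b : Int) (ys : List Int) (k : Int) (h1 : 1 ≤ k) (h2 : k ≤ (ys.length : Int)) :
    (PySem.List.pyGet? (a :: ys ++ [b]) k).getD 0 = (PySem.List.pyGet? ys (k - 1)).getD 0 := by
  rw [PySem.List.pyGet?_of_nonneg _ (by omega : (0:Int) ≤ k),
      PySem.List.pyGet?_of_nonneg _ (by omega : (0:Int) ≤ k - 1)]
  obtain ⟨s, hs⟩ : ∃ s : Nat, k.toNat = s + 1 := ⟨k.toNat - 1, by omega⟩
  have hks : (k - 1).toNat = s := by omega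
  have hslen : s < ys.length := by omega
  rw [hs, hks]
  simp [List.getElem?_cons_succ, List.getElem?_append_left hslen]

lemma loop_shift (a b : Int) (ys : List Int) : ∀ (n : Nat) (dist i j : Int), (j - i).toNat = n →
    1 ≤ i → j ≤ (ys.length : Int) →
    pvLoopA (a :: ys ++ [b]) dist i j = pvLoopA ys dist (i - 1) (j - 1) := by
  intro n
  induction n using Nat.strong_induction_on with
  | _ n ih =>
    intro dist i j hn hi hj
    conv_lhs => rw [pvLoopA]
    conv_rhs => rw [pvLoopA]
    by_cases h : i < j
    · have h' : i - 1 < j - 1 := by omega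
      simp only [if_pos h, if_pos h']
      rw [get_shift a b ys j (by omega) hj, get_shift a b ys i hi (by omega)]
      rw [ih ((j - 1) - (i + 1)).toNat (by omega) _ (i + 1) (j - 1) rfl (by omega) (by omega)]
      norm_num
    · have h' : ¬ (i - 1 < j - 1) := by omega
      simp [if_neg h]

lemma main_lemma (n : Nat) : ∀ xs : List Int, xs.length = n →
    pvLoopA xs 0 0 ((xs.length : Int) - 1)
      = pvW ((xs.length : Int) - 1) (PySem.List.enumerate xs 0) := by
  induction n using Nat.strong_induction_on with
  | _ n ih =>
    intro xs hlen
    rcases xs with _ | ⟨a, rest⟩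
    · rw [pvLoopA]; simp [pvW, PySem.List.enumerate_nil]
    · rcases rest.eq_nil_or_concat with rfl | ⟨ys, b, rfl⟩
      · rw [pvLoopA]
        simp [pvW, PySem.List.enumerate_cons, PySem.List.enumerate_nil]
      · simp only [List.concat_eq_append] at hlen ⊢
        rw [← List.cons_append]
        have hL : ((a :: ys ++ [b]).length : Int) - 1 = (ys.length : Int) + 1 := by
          simp only [List.length_append, List.length_cons, List.length_nil]
          push_cast; ring
        rw [hL, pvLoopA]
        have hpos : (0 : Int) < (ys.length : Int) + 1 := by positivity
        simp only [if_pos hpos]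
        have hlast : (PySem.List.pyGet? (a :: ys ++ [b]) ((ys.length : Int) + 1)).getD 0 = b := by
          have hcast : ((ys.length : Int) + 1) = (((a :: ys).length : Nat) : Int) := by
            simp [List.length_cons]
          rw [hcast, PySem.List.pyGet?_natCast]
          simp
        have hfst : (PySem.List.pyGet? (a :: ys ++ [b]) 0).getD 0 = a := by
          simp [List.cons_append, PySem.List.pyGet?_zero_cons]
        rw [hlast, hfst]
        rw [loop_acc _ _ _ _ _ rfl]
        rw [show (0 : Int) + 1 = 1 from by norm_num]
        rw [loop_shift a b ys _ _ 1 ((ys.length : Int) + 1 - 1) rfl (by omega) (by omega)]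
        have h10 : (1 : Int) - 1 = 0 := by norm_num
        have h11 : (ys.length : Int) + 1 - 1 - 1 = (ys.length : Int) - 1 := by ring
        rw [h10, h11]
        rw [ih ys.length (by simp only [List.length_append, List.length_cons, List.length_nil] at hlen; omega) ys rfl]
        rw [pvW_peel]
        ring

-- ===== VERDICT (by name: the statement is the Claim_ definition above) =====
theorem min_distance_1d_py_spec : Claim_equal_min_distance_1d_py := by
  intro points origin _
  unfold Spec_min_distance_1d_py min_distance_1d_py
  rw [altB, main_lemma points.length points rfl]
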